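-- pv_equiv track=rewrite | github.com/WeslleySoaresm/ASSESSMENT_PYTHON | Q03.py | construir_dicionario
-- ===== SOURCE A (Python) =====
-- def construir_dicionario(registros, coluna_chave):
--     dicionario_indexado = {}
--     valores_vistos = set()
--     duplicados = set()
--
--     for linha in registros:
--         if coluna_chave not in linha:
--             # Caso raro, mas evita quebra
--             continue
--
--         valor = linha[coluna_chave]
--
--         # Detectar duplicidade
--         if valor in valores_vistos:
--             duplicados.add(valor)
--         else:
--             valores_vistos.add(valor)
--
--         # Construir dicionário indexado
--         dicionario_indexado[valor] = linha
--
--     return dicionario_indexado, valores_vistos, duplicados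
-- ===== SOURCE B (Python) =====
-- def construir_dicionario(registros, coluna_chave):
--     valores = [linha[coluna_chave] for linha in registros if coluna_chave in linha]
--     dicionario_indexado = {linha[coluna_chave]: linha
--                            for linha in registros if coluna_chave in linha}
--     valores_vistos = set(valores)
--     duplicados = {v for i, v in enumerate(valores) if v in valores[:i]}
--     return dicionario_indexado, valores_vistos, duplicados
-- ===== Notes on version B (the rewrite author's own statement) =====
-- stated objective: simpler
-- what changed: B keeps no running seen/duplicate state: it extracts the key-value list and the index as comprehensions, takes valores_vistos as set(valores), and finds duplicados by a brute-force prefix-membership scan (v in valores[:i]) instead of A's incremental dual-set bookkeeping.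
import Mathlib
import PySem

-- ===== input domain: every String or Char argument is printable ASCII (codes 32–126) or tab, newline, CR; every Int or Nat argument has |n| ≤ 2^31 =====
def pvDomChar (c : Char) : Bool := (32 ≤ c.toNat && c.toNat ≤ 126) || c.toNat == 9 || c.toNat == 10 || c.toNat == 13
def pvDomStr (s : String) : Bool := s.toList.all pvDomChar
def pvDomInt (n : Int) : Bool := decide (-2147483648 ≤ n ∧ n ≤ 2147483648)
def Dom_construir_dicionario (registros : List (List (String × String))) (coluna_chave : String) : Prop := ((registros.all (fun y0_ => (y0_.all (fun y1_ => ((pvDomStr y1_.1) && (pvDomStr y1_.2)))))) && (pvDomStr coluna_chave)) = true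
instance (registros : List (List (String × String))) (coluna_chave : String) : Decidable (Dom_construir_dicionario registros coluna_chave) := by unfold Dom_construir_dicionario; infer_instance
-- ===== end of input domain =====

-- B drops A's running seen/duplicate bookkeeping: it derives everything from the extracted
-- value list, detecting duplicates by a prefix-membership scan (objective: simpler; not faster).

-- ===== PORT A =====
-- linha[coluna_chave]; only evaluated after the 'coluna_chave in linha' guard, where getD is exact
def pvValor (linha : List (String × String)) (coluna_chave : String) : String :=
  PySem.Dict.getD ⟨linha⟩ coluna_chave ""

-- the loop body of A after the 'continue' guard
def pvCoreA (coluna_chave : String)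
    (st : PySem.Dict String (List (String × String)) × List String × List String)
    (linha : List (String × String)) :
    PySem.Dict String (List (String × String)) × List String × List String :=
  let valor := pvValor linha coluna_chave
  let vd : List String × List String :=
    if PySem.Set.contains st.2.1 valor then (st.2.1, PySem.Set.add st.2.2 valor)
    else (PySem.Set.add st.2.1 valor, st.2.2)
  (PySem.Dict.insert st.1 valor linha, vd.1, vd.2)

def construir_dicionario (registros : List (List (String × String))) (coluna_chave : String) : (List (String × List (String × String))) × List String × List String :=
  let st := registros.foldl
    (fun st linha =>
      if PySem.Dict.contains (⟨linha⟩ : PySem.Dict String String) coluna_chave then pvCoreA coluna_chave st linha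
      else st)  -- 'continue'
    (PySem.Dict.empty, PySem.Set.empty, PySem.Set.empty)
  (st.1.items, st.2.1, st.2.2)

-- ===== PORT B =====
-- the raw comprehension body of duplicados: the values whose index i satisfies 'v in valores[:i]'
def pvDupRaw (valores : List String) : List String :=
  ((PySem.List.enumerate valores).filter
      (fun p => (PySem.List.slice valores none (some p.1)).contains p.2)).map (·.2)

def construir_dicionario_alt (registros : List (List (String × String))) (coluna_chave : String) : (List (String × List (String × String))) × List String × List String :=
  let linhas := registros.filter (fun linha => PySem.Dict.contains (⟨linha⟩ : PySem.Dict String String) coluna_chave)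
  let valores := linhas.map (fun linha => pvValor linha coluna_chave)
  let dicionario_indexado := linhas.foldl
    (fun d linha => PySem.Dict.insert d (pvValor linha coluna_chave) linha) PySem.Dict.empty
  let valores_vistos := PySem.Set.ofList valores
  let duplicados := PySem.Set.ofList (pvDupRaw valores)
  (dicionario_indexado.items, valores_vistos, duplicados)

-- ===== PRECONDITION & SPEC =====
def Spec_construir_dicionario (registros : List (List (String × String))) (coluna_chave : String) (out : (List (String × List (String × String))) × List String × List String) : Prop := out = construir_dicionario_alt registros coluna_chave
instance (registros : List (List (String × String))) (coluna_chave : String) (out : (List (String × List (String × String))) × List String × List String) : Decidable (Spec_construir_dicionario registros coluna_chave out) := by unfold Spec_construir_dicionario; infer_instance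

-- ===== CLAIM (what is proved, stated in full; the proofs are below) =====
def Claim_equal_construir_dicionario : Prop := ∀ (registros : List (List (String × String))) (coluna_chave : String), Dom_construir_dicionario registros coluna_chave → Spec_construir_dicionario registros coluna_chave (construir_dicionario registros coluna_chave)

-- ===== LEMMAS AND PROOFS =====

-- the seen/duplicate part of A's loop body, as a step on (valores_vistos, duplicados) over the value
def pvSD (st : List String × List String) (v : String) : List String × List String :=
  if PySem.Set.contains st.1 v then (st.1, PySem.Set.add st.2 v) else (PySem.Set.add st.1 v, st.2)

-- A's fold splits componentwise: the dict is a fold of inserts, the two sets a fold of pvSD over the values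
lemma pv_split (coluna_chave : String) (rows : List (List (String × String)))
    (d : PySem.Dict String (List (String × String))) (s u : List String) :
    rows.foldl (pvCoreA coluna_chave) (d, s, u)
      = (rows.foldl (fun d linha => PySem.Dict.insert d (pvValor linha coluna_chave) linha) d,
         (rows.map (fun linha => pvValor linha coluna_chave)).foldl pvSD (s, u)) := by
  induction rows generalizing d s u with
  | nil => rfl
  | cons linha rows ih =>
    simp only [List.foldl_cons, List.map_cons]
    rw [show pvCoreA coluna_chave (d, s, u) linha
          = (PySem.Dict.insert d (pvValor linha coluna_chave) linha, pvSD (s, u) (pvValor linha coluna_chave)) from rfl]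
    exact ih _ _ _

-- pvDupRaw grows from the right: appending v contributes v iff v already occurs in the prefix
lemma pv_dupraw_append (p : List String) (v : String) :
    pvDupRaw (p ++ [v]) = pvDupRaw p ++ (if p.contains v then [v] else []) := by
  unfold pvDupRaw
  rw [PySem.List.enumerate_append, List.filter_append, List.map_append]
  congr 1
  · -- entries of the old part only look at their own prefix
    congr 1
    apply List.filter_congr
    intro q hq
    obtain ⟨k, hk, rfl⟩ := (PySem.List.mem_enumerate_iff _ _ _).1 hq
    simp only [zero_add]
    rw [PySem.List.slice_to_natCast, PySem.List.slice_to_natCast,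
        List.take_append_of_le_length (le_of_lt hk)]
  · -- the new entry (p.length, v) tests membership in take p.length (p ++ [v]) = p
    simp only [PySem.List.enumerate_nil, PySem.List.enumerate_cons, zero_add, List.filter_cons]
    rw [PySem.List.slice_to_natCast, List.take_left]
    by_cases h : v ∈ p <;> simp [h]

-- the fold of pvSD over values equals (set of values, set of pvDupRaw), by left-to-right induction
lemma pv_sd_fold (l p : List String) :
    l.foldl pvSD (PySem.Set.ofList p, PySem.Set.ofList (pvDupRaw p))
      = (PySem.Set.ofList (p ++ l), PySem.Set.ofList (pvDupRaw (p ++ l))) := by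
  induction l generalizing p with
  | nil => simp
  | cons v t ih =>
    have hmem : PySem.Set.contains (PySem.Set.ofList p) v = true ↔ v ∈ p := by
      rw [PySem.Set.contains_iff, PySem.Set.mem_ofList]
    have hstep : pvSD (PySem.Set.ofList p, PySem.Set.ofList (pvDupRaw p)) v
        = (PySem.Set.ofList (p ++ [v]), PySem.Set.ofList (pvDupRaw (p ++ [v]))) := by
      rw [pv_dupraw_append]
      by_cases h : v ∈ p
      · have h1 : PySem.Set.contains (PySem.Set.ofList p) v = true := hmem.2 h
        have h2 : p.contains v = true := by simpa using h
        simp only [pvSD, h1, if_true, h2]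
        rw [PySem.Set.ofList_append_singleton, PySem.Set.ofList_append_singleton,
            PySem.Set.add_of_mem ((PySem.Set.mem_ofList p v).mpr h)]
      · have h1 : PySem.Set.contains (PySem.Set.ofList p) v = false := by
          rw [← Bool.not_eq_true, hmem]; exact h
        have h2 : p.contains v = false := by simpa using h
        simp only [pvSD, h1, Bool.false_eq_true, if_false, h2, List.append_nil]
        rw [PySem.Set.ofList_append_singleton]
    rw [List.foldl_cons, hstep, ih (p ++ [v])]
    simp

-- ===== VERDICT (by name: the statement is the Claim_ definition above) =====
theorem construir_dicionario_spec : Claim_equal_construir_dicionario := by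
  intro registros coluna_chave _
  show construir_dicionario registros coluna_chave = construir_dicionario_alt registros coluna_chave
  simp only [construir_dicionario, construir_dicionario_alt]
  rw [← List.foldl_filter]
  rw [show (PySem.Dict.empty, PySem.Set.empty, PySem.Set.empty)
        = ((PySem.Dict.empty : PySem.Dict String (List (String × String))),
           ([] : List String), ([] : List String)) from rfl]
  rw [pv_split]
  have := pv_sd_fold
    ((registros.filter (fun linha => PySem.Dict.contains (⟨linha⟩ : PySem.Dict String String) coluna_chave)).map
      (fun linha => pvValor linha coluna_chave)) []
  simp only [List.nil_append, PySem.Set.ofList_nil] at this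
  rw [show (([] : List String), ([] : List String))
        = ((PySem.Set.ofList [] : List String), PySem.Set.ofList (pvDupRaw [])) from rfl] at *
  simp only [PySem.Set.ofList_nil] at this ⊢
  rw [this]
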